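-- pv_equiv track=rewrite | github.com/thingscouldbeworse/skybot | reddit_monitor.py | is_image_url
-- ===== SOURCE A (Python) =====
-- def is_image_url(url):
--     """Check if a URL points to an image."""
--     image_extensions = [
--         ".jpg",
--         ".jpeg",
--         ".png",
--         ".gif",  # Common formats
--         ".webp",  # Web-optimized format
--         ".bmp",
--         ".tiff",
--         ".tif",  # Other standard formats
--         ".heic",
--         ".heif",  # High-efficiency formats
--     ]
--     return any(url.lower().endswith(ext) for ext in image_extensions)
-- ===== SOURCE B (Python) =====
-- _IMAGE_EXTENSIONS = {
--     ".jpg", ".jpeg", ".png", ".gif", ".webp",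
--     ".bmp", ".tiff", ".tif", ".heic", ".heif",
-- }
--
--
-- def is_image_url(url):
--     """Check if a URL points to an image."""
--     low = url.lower()
--     i = low.rfind(".")
--     if i == -1:
--         return False
--     return low[i:] in _IMAGE_EXTENSIONS
-- ===== Notes on version B (the rewrite author's own statement) =====
-- stated objective: idiomatic
-- what changed: Replaces the scan over ten extensions with any(endswith) by extracting the substring after the final dot (found with rfind) once and testing it with a single O(1) set membership.
import Mathlib
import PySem

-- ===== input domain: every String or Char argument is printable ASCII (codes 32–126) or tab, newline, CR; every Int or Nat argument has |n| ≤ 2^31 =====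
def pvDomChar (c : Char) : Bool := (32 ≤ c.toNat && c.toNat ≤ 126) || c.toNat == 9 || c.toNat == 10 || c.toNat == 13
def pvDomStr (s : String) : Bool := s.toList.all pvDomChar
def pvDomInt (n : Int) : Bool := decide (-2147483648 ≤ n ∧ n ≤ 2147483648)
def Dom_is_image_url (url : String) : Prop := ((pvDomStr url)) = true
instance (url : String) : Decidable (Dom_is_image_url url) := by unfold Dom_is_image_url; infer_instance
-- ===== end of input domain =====

-- B replaces A's scan over the ten extensions (any + endswith) with one rfind of the
-- last '.' and a single set membership test of that suffix; idiomatic, not claimed faster.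

-- ===== PORT A =====
def is_image_url (url : String) : Bool :=
  let image_extensions : List String :=
    [".jpg", ".jpeg", ".png", ".gif", ".webp", ".bmp", ".tiff", ".tif", ".heic", ".heif"]
  image_extensions.any (fun ext => PySem.Str.endswith (PySem.Str.lower url) ext)

-- ===== PORT B =====
def imageExtensionSet : PySem.Set String :=
  PySem.Set.ofList
    [".jpg", ".jpeg", ".png", ".gif", ".webp", ".bmp", ".tiff", ".tif", ".heic", ".heif"]

def is_image_url_alt (url : String) : Bool :=
  let low := PySem.Str.lower url
  let i := PySem.Str.rfind low "."
  if i == -1 then false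
  else PySem.Set.contains imageExtensionSet (PySem.Str.slice low (some i) none)

-- ===== PRECONDITION & SPEC =====
def Spec_is_image_url (url : String) (out : Bool) : Prop := out = is_image_url_alt url
instance (url : String) (out : Bool) : Decidable (Spec_is_image_url url out) := by unfold Spec_is_image_url; infer_instance

-- ===== CLAIM (what is proved, stated in full; the proofs are below) =====
def Claim_equal_is_image_url : Prop := ∀ (url : String), Dom_is_image_url url → Spec_is_image_url url (is_image_url url)

-- ===== LEMMAS AND PROOFS =====

-- the shared extension list, for the proofs
def pvExts : List String :=
  [".jpg", ".jpeg", ".png", ".gif", ".webp", ".bmp", ".tiff", ".tif", ".heic", ".heif"]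

theorem pv_ext_facts : ∀ e ∈ pvExts, e.toList.head? = some '.' ∧ '.' ∉ e.toList.tail := by
  decide

-- ['.'] is a prefix of L.drop j exactly when the character at j is '.'
theorem pv_isPrefixOf_drop (L : List Char) (j : Nat) :
    (['.'].isPrefixOf (L.drop j)) = true ↔ L[j]? = some '.' := by
  rw [List.isPrefixOf_iff_prefix]
  constructor
  · rintro ⟨r, hr⟩
    have : (L.drop j).head? = some '.' := by
      rw [← hr]; rfl
    rwa [List.head?_drop] at this
  · intro h
    have hh : (L.drop j).head? = some '.' := by rwa [List.head?_drop]
    cases hd : L.drop j with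
    | nil => simp [hd] at hh
    | cons c t =>
      rw [hd] at hh
      simp at hh
      exact hh ▸ ⟨t, rfl⟩

-- characterisation of rfind.go for the pattern ['.']
theorem pv_go_spec (L : List Char) (k : Nat) :
    (PySem.Chars.rfind.go L ['.'] k = -1 ∧ ∀ j ≤ k, L[j]? ≠ some '.')
  ∨ (∃ m : Nat, PySem.Chars.rfind.go L ['.'] k = (m : Int) ∧ m ≤ k ∧ L[m]? = some '.'
       ∧ ∀ j, m < j → j ≤ k → L[j]? ≠ some '.') := by
  induction k with
  | zero =>
    rw [PySem.Chars.rfind.go.eq_def]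
    by_cases h : (['.'].isPrefixOf L) = true
    · right
      refine ⟨0, by simp [h], le_refl 0, ?_, by omega⟩
      have := (pv_isPrefixOf_drop L 0).mp (by simpa using h)
      simpa using this
    · left
      refine ⟨by simp [h], ?_⟩
      intro j hj
      interval_cases j
      have := (pv_isPrefixOf_drop L 0).not.mp (by simpa using h)
      simpa using this
  | succ k ih =>
    rw [PySem.Chars.rfind.go.eq_def]
    by_cases h : (['.'].isPrefixOf (L.drop (k + 1))) = true
    · right
      exact ⟨k + 1, by simp [h], le_refl _, (pv_isPrefixOf_drop L (k + 1)).mp h, by omega⟩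
    · have hnot : L[k + 1]? ≠ some '.' := fun hc => h ((pv_isPrefixOf_drop L (k + 1)).mpr hc)
      rcases ih with ⟨h1, h2⟩ | ⟨m, h1, h2, h3, h4⟩
      · left
        refine ⟨by simp [h, h1], ?_⟩
        intro j hj
        rcases Nat.lt_or_ge j (k + 1) with hj' | hj'
        · exact h2 j (by omega)
        · have : j = k + 1 := by omega
          exact this ▸ hnot
      · right
        refine ⟨m, by simp [h, h1], by omega, h3, ?_⟩
        intro j hmj hj
        rcases Nat.lt_or_ge j (k + 1) with hj' | hj'
        · exact h4 j hmj (by omega)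
        · have : j = k + 1 := by omega
          exact this ▸ hnot

-- a suffix whose only '.' is its head must start exactly at the last '.' of L
theorem pv_suffix_iff_drop (L e : List Char) (m : Nat)
    (hm : L[m]? = some '.') (hmax : ∀ j, m < j → L[j]? ≠ some '.')
    (hh : e.head? = some '.') (ht : '.' ∉ e.tail) :
    e <:+ L ↔ e = L.drop m := by
  cases e with
  | nil => simp at hh
  | cons c t =>
    simp only [List.head?_cons, Option.some.injEq] at hh
    subst hh
    simp only [List.tail_cons] at ht
    constructor
    · rintro ⟨p, hp⟩
      have hq : L[p.length]? = some '.' := by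
        rw [← hp, List.getElem?_append_right (le_refl _)]
        simp
      have h1 : ¬ m < p.length := fun hlt => hmax p.length hlt hq
      have h2 : ¬ p.length < m := by
        intro hlt
        have := hm
        rw [← hp, List.getElem?_append_right (by omega)] at this
        have hidx : m - p.length = (m - p.length - 1) + 1 := by omega
        rw [hidx] at this
        simp only [List.getElem?_cons_succ] at this
        exact ht (List.mem_of_getElem? this)
      have : p.length = m := by omega
      rw [← hp, ← this, List.drop_left]
    · intro h
      exact h ▸ List.drop_suffix m L


-- main pointwise equivalence
theorem pv_main (url : String) : is_image_url url = is_image_url_alt url := by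
  unfold is_image_url is_image_url_alt
  simp only []
  have hset : imageExtensionSet = pvExts := by decide
  have hfind : PySem.Str.rfind (PySem.Str.lower url) "." =
      PySem.Chars.rfind.go (PySem.Str.lower url).toList ['.'] (PySem.Str.lower url).toList.length := by
    rw [PySem.Str.rfind_eq]; rfl
  set L : List Char := (PySem.Str.lower url).toList with hL
  rcases pv_go_spec L L.length with ⟨h1, h2⟩ | ⟨m, h1, h2, h3, h4⟩
  · -- no '.' in the lowered url: both sides are false
    have hnd : ∀ (j : Nat), L[j]? ≠ some '.' := by
      intro j
      by_cases hj : j ≤ L.length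
      · exact h2 j hj
      · simp [List.getElem?_eq_none (by omega : L.length ≤ j)]
    rw [hfind, h1]
    simp only [BEq.rfl, if_true]
    rw [List.any_eq_false]
    intro e he hend
    rw [PySem.Str.endswith_eq] at hend
    have hmem : '.' ∈ L := by
      have hsfx : e.toList <:+ L := (PySem.Chars.endswith_iff L e.toList).mp hend
      have ⟨hh, _⟩ := pv_ext_facts e he
      have : '.' ∈ e.toList := by
        cases hx : e.toList with
        | nil => simp [hx] at hh
        | cons c t => rw [hx] at hh; simp at hh; simp [hh]
      exact hsfx.subset this
    rcases List.mem_iff_getElem?.mp hmem with ⟨j, hj⟩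
    exact hnd j hj
  · -- the last '.' is at index m
    have hmax : ∀ j, m < j → L[j]? ≠ some '.' := by
      intro j hmj
      by_cases hj : j ≤ L.length
      · exact h4 j hmj hj
      · simp [List.getElem?_eq_none (by omega : L.length ≤ j)]
    rw [hfind, h1]
    have hne : (((m : Int)) == (-1 : Int)) = false := by
      simp only [beq_eq_false_iff_ne, ne_eq]
      omega
    rw [hne]
    simp only [Bool.false_eq_true, if_false]
    have hslice : (PySem.Str.slice (PySem.Str.lower url) (some ((m : Int))) none).toList = L.drop m := by
      rw [PySem.Str.toList_slice, PySem.Chars.slice_eq_listSlice,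
        PySem.List.slice_from _ (by positivity)]
      rw [hL, PySem.Str.toList_lower]
      simp
    set x : String := PySem.Str.slice (PySem.Str.lower url) (some ((m : Int))) none with hx
    rw [hset]
    rw [Bool.eq_iff_iff]
    constructor
    · intro hA
      rcases List.any_eq_true.mp hA with ⟨e, he, hend⟩
      rw [PySem.Str.endswith_eq] at hend
      have ⟨hh, ht⟩ := pv_ext_facts e he
      have hsfx : e.toList <:+ L := (PySem.Chars.endswith_iff L e.toList).mp hend
      have hdrop : e.toList = L.drop m := (pv_suffix_iff_drop L e.toList m h3 hmax hh ht).mp hsfx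
      have hex : e = x := String.toList_inj.mp (by rw [hdrop, hslice])
      simp only [PySem.Set.contains]
      exact List.contains_iff_mem.mpr (hex ▸ he)
    · intro hB
      have hxm : x ∈ pvExts := List.contains_iff_mem.mp (by simpa [PySem.Set.contains] using hB)
      have ⟨hh, ht⟩ := pv_ext_facts x hxm
      refine List.any_eq_true.mpr ⟨x, hxm, ?_⟩
      rw [PySem.Str.endswith_eq, PySem.Chars.endswith_iff]
      exact (pv_suffix_iff_drop L x.toList m h3 hmax hh ht).mpr hslice


-- ===== VERDICT (by name: the statement is the Claim_ definition above) =====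
theorem is_image_url_spec : Claim_equal_is_image_url := by
  intro url _
  exact pv_main url
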